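-- pv_equiv track=rewrite | github.com/MariamSofia/Granos-y-depositos | Programa_granos_y_depositos.py | calcular_maxima_recaudacion
-- ===== SOURCE A (Python) =====
-- def calcular_maxima_recaudacion(matriz_cargada, recaudacion):
--     """
--     Calcula el depósito con la mayor recaudación.
--
--     :param matriz_cargada: La matriz con las existencias cargadas.
--     :param recaudacion: Lista con la recaudación por cereal.
--     :return: Lista con el depósito con la mayor recaudación.
--     """
--     mayor_recaudacion = max(recaudacion)
--     lista_recaudacion = []
--
--     for i in range(len(recaudacion)):
--         if recaudacion[i] == mayor_recaudacion:
--             nombre_recaudacion = matriz_cargada[0][i]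
--             lista_recaudacion.append(nombre_recaudacion)
--
--     return lista_recaudacion if lista_recaudacion else ["Ninguno"]
-- ===== SOURCE B (Python) =====
-- def calcular_maxima_recaudacion(matriz_cargada, recaudacion):
--     """Single pass: track the running maximum and the matching names together."""
--     fila = matriz_cargada[0]
--     best = recaudacion[0]
--     nombres = [fila[0]]
--     for i in range(1, len(recaudacion)):
--         v = recaudacion[i]
--         if v > best:
--             best = v
--             nombres = [fila[i]]
--         elif v == best:
--             nombres.append(fila[i])
--     return nombres
-- ===== Notes on version B (the rewrite author's own statement) =====
-- stated objective: alternative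
-- what changed: Replaced max()-then-rescan (two passes plus a dead 'Ninguno' fallback) by a single pass that maintains the running maximum and the list of matching names, resetting on a strictly greater value.
import Mathlib
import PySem

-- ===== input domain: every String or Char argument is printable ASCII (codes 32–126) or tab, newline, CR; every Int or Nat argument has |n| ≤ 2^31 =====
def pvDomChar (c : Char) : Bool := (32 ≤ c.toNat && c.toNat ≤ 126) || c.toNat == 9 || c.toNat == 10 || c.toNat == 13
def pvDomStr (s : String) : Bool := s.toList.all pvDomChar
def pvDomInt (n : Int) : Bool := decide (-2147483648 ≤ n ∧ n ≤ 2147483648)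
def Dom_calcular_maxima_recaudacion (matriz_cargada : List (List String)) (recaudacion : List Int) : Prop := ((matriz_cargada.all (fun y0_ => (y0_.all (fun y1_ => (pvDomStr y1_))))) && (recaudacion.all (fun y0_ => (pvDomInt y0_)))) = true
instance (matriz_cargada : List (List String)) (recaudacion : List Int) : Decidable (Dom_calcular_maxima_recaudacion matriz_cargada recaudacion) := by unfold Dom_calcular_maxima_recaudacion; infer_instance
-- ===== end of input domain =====

-- B replaces A's max()-then-rescan (two passes plus an unreachable "Ninguno" fallback) by a
-- single pass maintaining the running maximum together with the list of matching names.

-- ===== PORT A =====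
def calcular_maxima_recaudacion (matriz_cargada : List (List String)) (recaudacion : List Int) : List String :=
  let mayor_recaudacion := (PySem.List.max? recaudacion (fun y => y)).getD 0
  let lista_recaudacion :=
    (PySem.List.pyRange 0 recaudacion.length 1).foldl
      (fun acc i =>
        if PySem.List.pyGetD recaudacion i 0 = mayor_recaudacion then
          acc ++ [PySem.List.pyGetD (PySem.List.pyGetD matriz_cargada 0 []) i ""]
        else acc) []
  if lista_recaudacion ≠ [] then lista_recaudacion else ["Ninguno"]

-- ===== PORT B =====
def calcular_maxima_recaudacion_alt (matriz_cargada : List (List String)) (recaudacion : List Int) : List String :=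
  let fila := PySem.List.pyGetD matriz_cargada 0 []
  let st :=
    (PySem.List.pyRange 1 recaudacion.length 1).foldl
      (fun (st : Int × List String) i =>
        let v := PySem.List.pyGetD recaudacion i 0
        if st.1 < v then (v, [PySem.List.pyGetD fila i ""])
        else if v = st.1 then (st.1, st.2 ++ [PySem.List.pyGetD fila i ""])
        else st)
      (PySem.List.pyGetD recaudacion 0 0, [PySem.List.pyGetD fila 0 ""])
  st.2

-- ===== PRECONDITION & SPEC =====
-- Pre_ excludes exactly the inputs on which Python A raises: empty recaudacion (ValueError from
-- max([])), and a missing/too-short first row (IndexError at matriz_cargada[0][i] for some index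
-- i holding the maximum revenue). On every other input A returns, and so does B.
def Pre_calcular_maxima_recaudacion (matriz_cargada : List (List String)) (recaudacion : List Int) : Prop :=
  recaudacion ≠ [] ∧ matriz_cargada ≠ [] ∧
  ∀ i : Fin recaudacion.length,
    recaudacion.get i = (PySem.List.max? recaudacion (fun y => y)).getD 0 →
    (i : Nat) < (matriz_cargada.headD []).length
instance (matriz_cargada : List (List String)) (recaudacion : List Int) : Decidable (Pre_calcular_maxima_recaudacion matriz_cargada recaudacion) := by unfold Pre_calcular_maxima_recaudacion; infer_instance

def pvWitness_calcular_maxima_recaudacion : List (List String) × List Int :=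
  ([["Norte", "Sur", "Este"]], [3, 7, 7])

def Spec_calcular_maxima_recaudacion (matriz_cargada : List (List String)) (recaudacion : List Int) (out : List String) : Prop := out = calcular_maxima_recaudacion_alt matriz_cargada recaudacion
instance (matriz_cargada : List (List String)) (recaudacion : List Int) (out : List String) : Decidable (Spec_calcular_maxima_recaudacion matriz_cargada recaudacion out) := by unfold Spec_calcular_maxima_recaudacion; infer_instance

-- ===== CLAIM (what is proved, stated in full; the proofs are below) =====
def Claim_equal_calcular_maxima_recaudacion : Prop := ∀ (matriz_cargada : List (List String)) (recaudacion : List Int), Dom_calcular_maxima_recaudacion matriz_cargada recaudacion → Pre_calcular_maxima_recaudacion matriz_cargada recaudacion → Spec_calcular_maxima_recaudacion matriz_cargada recaudacion (calcular_maxima_recaudacion matriz_cargada recaudacion)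

-- ===== LEMMAS AND PROOFS =====

-- The running maximum of the values at indices [0, k).
def pvRunMax (g : Int → Int) (k : Nat) : Int :=
  (PySem.List.pyRange 1 k 1).foldl (fun a i => max a (g i)) (g 0)

theorem pvRunMax_succ (g : Int → Int) (k : Nat) (hk : 1 ≤ k) :
    pvRunMax g (k+1) = max (pvRunMax g k) (g k) := by
  unfold pvRunMax
  have h : ((k+1 : Nat) : Int) = (k : Int) + 1 := by push_cast; ring
  rw [h, PySem.List.pyRange_one_succ_right (by exact_mod_cast hk), List.foldl_append]
  simp

-- B's loop invariant: after processing indices 1..k-1 the state is the running maximum of the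
-- first k values paired with the names at the indices attaining it, and the running maximum
-- bounds every value seen so far.
theorem pvInvariant (g : Int → Int) (f : Int → String) (k : Nat) (hk : 1 ≤ k) :
    (PySem.List.pyRange 1 k 1).foldl
      (fun (st : Int × List String) i =>
        if st.1 < g i then (g i, [f i])
        else if g i = st.1 then (st.1, st.2 ++ [f i])
        else st)
      (g 0, [f 0])
    = (pvRunMax g k,
       ((PySem.List.pyRange 0 k 1).filter (fun i => g i == pvRunMax g k)).map f)
    ∧ (∀ i : Int, 0 ≤ i → i < k → g i ≤ pvRunMax g k) := by
  induction k, hk using Nat.le_induction with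
  | base =>
      constructor
      · rw [PySem.List.pyRange_one_eq_nil (by norm_num)]
        have h1 : ((1:Nat):Int) = 0 + 1 := by norm_num
        rw [pvRunMax, PySem.List.pyRange_one_eq_nil (by norm_num), h1,
            PySem.List.pyRange_one_singleton]
        simp [List.filter]
      · intro i h0 h1
        have : i = 0 := by omega
        subst this
        rw [pvRunMax, PySem.List.pyRange_one_eq_nil (by norm_num)]
        simp
  | succ k hk ih =>
      obtain ⟨ih1, ih2⟩ := ih
      have hcast : ((k+1 : Nat) : Int) = (k : Int) + 1 := by push_cast; ring
      have hsplit1 : PySem.List.pyRange 1 ((k:Int)+1) 1 = PySem.List.pyRange 1 k 1 ++ [(k:Int)] := by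
        rw [PySem.List.pyRange_one_succ_right (by exact_mod_cast hk)]
      have hsplit0 : PySem.List.pyRange 0 ((k:Int)+1) 1 = PySem.List.pyRange 0 k 1 ++ [(k:Int)] := by
        rw [PySem.List.pyRange_one_succ_right (by positivity)]
      rw [hcast, hsplit1, List.foldl_append, ih1, pvRunMax_succ g k hk, hsplit0, List.filter_append]
      by_cases hgt : pvRunMax g k < g k
      · have hmax : max (pvRunMax g k) (g k) = g k := by omega
        rw [hmax]
        have hfilt : (PySem.List.pyRange 0 k 1).filter (fun i => g i == g (k:Int)) = [] := by
          rw [List.filter_eq_nil_iff]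
          intro i hi
          have := (PySem.List.mem_pyRange_one.mp hi)
          have := ih2 i this.1 this.2
          simp only [beq_iff_eq]
          omega
        constructor
        · simp only [List.foldl_cons, List.foldl_nil, hgt, if_pos]
          simp [hfilt, List.filter]
        · intro i h0 h1
          by_cases hik : i < (k:Int)
          · have := ih2 i h0 hik; omega
          · have : i = (k:Int) := by omega
            subst this; omega
      · push Not at hgt
        have hmax : max (pvRunMax g k) (g k) = pvRunMax g k := by omega
        rw [hmax]
        constructor
        · simp only [List.foldl_cons, List.foldl_nil]
          rw [if_neg (by omega)]
          by_cases heq : g (k:Int) = pvRunMax g k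
          · rw [if_pos heq]
            simp [List.filter, heq]
          · rw [if_neg heq]
            have hb : (g (k:Int) == pvRunMax g k) = false := beq_eq_false_iff_ne.mpr heq
            simp [List.filter, hb]
        · intro i h0 h1
          by_cases hik : i < (k:Int)
          · exact ih2 i h0 hik
          · have : i = (k:Int) := by omega
            subst this; omega

theorem pvMain (matriz_cargada : List (List String)) (recaudacion : List Int)
    (hne : recaudacion ≠ []) :
    calcular_maxima_recaudacion matriz_cargada recaudacion
      = calcular_maxima_recaudacion_alt matriz_cargada recaudacion := by
  cases recaudacion with
  | nil => exact absurd rfl hne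
  | cons x t =>
    unfold calcular_maxima_recaudacion calcular_maxima_recaudacion_alt
    simp only []
    set fila := PySem.List.pyGetD matriz_cargada 0 [] with hfila
    have hlen : 1 ≤ (x::t).length := by simp
    have hinv := pvInvariant (fun i => PySem.List.pyGetD (x::t) i 0)
                             (fun i => PySem.List.pyGetD fila i "") (x::t).length hlen
    simp only [] at hinv
    obtain ⟨hinv1, -⟩ := hinv
    -- the running max equals A's mayor_recaudacion
    have hmayor : (PySem.List.max? (x::t) (fun y => y)).getD 0 = List.foldl max x t := by
      rw [PySem.List.max?_id_cons]; rfl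
    have hM : pvRunMax (fun i => PySem.List.pyGetD (x::t) i 0) (x::t).length
        = List.foldl max x t := by
      unfold pvRunMax
      have := PySem.List.foldl_pyRange_pyGetD' (x::t) 0 (fun a v => max a v)
          (PySem.List.pyGetD (x::t) 0 0) (a := 1) (by norm_num)
      simp only [PySem.List.pyGetD_zero_cons] at this ⊢
      rw [this]
      simp
    -- A's append-if loop is a filter-then-map
    have hA : (PySem.List.pyRange 0 (x::t).length 1).foldl
        (fun acc i =>
          if PySem.List.pyGetD (x::t) i 0 = List.foldl max x t then
            acc ++ [PySem.List.pyGetD fila i ""]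
          else acc) ([] : List String)
        = ((PySem.List.pyRange 0 (x::t).length 1).filter
            (fun i => PySem.List.pyGetD (x::t) i 0 == List.foldl max x t)).map
            (fun i => PySem.List.pyGetD fila i "") := by
      have hform : (fun (acc : List String) (i : Int) =>
          if PySem.List.pyGetD (x::t) i 0 = List.foldl max x t then
            acc ++ [PySem.List.pyGetD fila i ""]
          else acc)
        = (fun (acc : List String) (i : Int) =>
          if (fun j => PySem.List.pyGetD (x::t) j 0 == List.foldl max x t) i = true then
            acc ++ [(fun j => PySem.List.pyGetD fila j "") i]
          else acc) := by
        funext acc i; simp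
      rw [hform, PySem.List.foldl_append_if]
      simp
    -- the maximum is attained, so A's list is nonempty
    have hmem : List.foldl max x t ∈ (x::t) :=
      PySem.List.max?_mem (PySem.List.max?_id_cons x t)
    obtain ⟨j, hj, hjv⟩ := List.mem_iff_getElem.mp hmem
    have hnonempty : ((PySem.List.pyRange 0 (x::t).length 1).filter
        (fun i => PySem.List.pyGetD (x::t) i 0 == List.foldl max x t)) ≠ [] := by
      apply List.ne_nil_of_mem (a := (j : Int))
      rw [List.mem_filter]
      refine ⟨PySem.List.mem_pyRange_one.mpr ⟨by positivity, by exact_mod_cast hj⟩, ?_⟩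
      simp only [PySem.List.pyGetD_natCast, beq_iff_eq]
      rw [List.getD_eq_getElem _ _ hj, hjv]
    rw [hmayor, hA, hinv1]
    simp only [hM]
    rw [if_pos]
    simpa using hnonempty

-- ===== VERDICT (by name: the statement is the Claim_ definition above) =====
theorem calcular_maxima_recaudacion_spec : Claim_equal_calcular_maxima_recaudacion := by
  intro matriz_cargada recaudacion _hdom hpre
  exact pvMain matriz_cargada recaudacion hpre.1
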